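-- pv_equiv track=rewrite | github.com/olhaishchenko/BBQ_Datei | Beginner_Python/tabelle_excel.py | ex_tabelle_zu_CSV
-- ===== SOURCE A (Python) =====
-- def ex_tabelle_zu_CSV(ex_tab):
--     spalten_namen = list(ex_tab.keys())
--     zeilen_anzahl = len(ex_tab[spalten_namen[0]])
--     rows = [spalten_namen]
--     for i in range(1, zeilen_anzahl + 1):
--         row = [ex_tab[spalte][i] for spalte in spalten_namen]
--         rows.append([str(i)] + row)
--     return rows
-- ===== SOURCE B (Python) =====
-- def ex_tabelle_zu_CSV(ex_tab):
--     cols = list(ex_tab.keys())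
--     n = len(ex_tab[cols[0]])
--
--     def cells(cs, i):
--         return [] if not cs else [ex_tab[cs[0]][i]] + cells(cs[1:], i)
--
--     def rows(i):
--         return [] if i > n else [[str(i)] + cells(cols, i)] + rows(i + 1)
--
--     return [cols] + rows(1)
-- ===== Notes on version B (the rewrite author's own statement) =====
-- stated objective: alternative
-- what changed: B replaces A's loop-with-inner-comprehension by two mutually independent recursive builders: cells(cs, i) recurses over the column list to build one row, and rows(i) recurses over the row index to build the list of rows, consing results front-to-back instead of appending to an accumulator list.
import Mathlib
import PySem

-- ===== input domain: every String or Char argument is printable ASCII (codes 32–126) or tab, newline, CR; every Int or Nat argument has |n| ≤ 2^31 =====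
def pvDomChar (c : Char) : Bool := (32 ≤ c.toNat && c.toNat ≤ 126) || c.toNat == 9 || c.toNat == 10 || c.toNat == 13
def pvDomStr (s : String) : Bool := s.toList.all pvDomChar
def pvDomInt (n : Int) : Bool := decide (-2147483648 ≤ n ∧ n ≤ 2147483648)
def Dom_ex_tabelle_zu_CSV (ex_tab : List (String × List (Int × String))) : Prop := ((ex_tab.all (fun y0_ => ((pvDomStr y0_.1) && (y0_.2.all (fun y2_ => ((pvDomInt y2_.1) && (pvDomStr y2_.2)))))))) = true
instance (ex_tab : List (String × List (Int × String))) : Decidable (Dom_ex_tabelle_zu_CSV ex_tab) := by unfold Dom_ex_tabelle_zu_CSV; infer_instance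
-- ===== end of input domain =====

-- B builds the result with two independent recursions (over the column list for one row,
-- over the row index for the row list), consing front-to-back, instead of A's
-- accumulator loop with an inner comprehension; objective: alternative decomposition, same cost.

-- ===== PORT A =====
-- ex_tab[spalte][i] with the lookups guaranteed by Pre_; the .getD fallbacks are unreachable under Pre_.
def pvCell (d : PySem.Dict String (List (Int × String))) (c : String) (i : Int) : String :=
  ((PySem.Dict.ofList ((d.get? c).getD [])).get? i).getD ""

def ex_tabelle_zu_CSV (ex_tab : List (String × List (Int × String))) : List (List String) :=
  let d := PySem.Dict.ofList ex_tab
  let spalten_namen := d.keys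
  match PySem.List.pyGet? spalten_namen 0 with
  | none => []                                   -- spalten_namen[0]: IndexError, excluded by Pre_
  | some c0 =>
    let zeilen_anzahl : Int := (PySem.Dict.ofList ((d.get? c0).getD [])).size
    (PySem.List.pyRange 1 (zeilen_anzahl + 1) 1).foldl
      (fun rows i =>
        rows ++ [[PySem.Int.toStr i] ++ spalten_namen.map (fun spalte => pvCell d spalte i)])
      [spalten_namen]

-- ===== PORT B =====
-- cells(cs, i): recursion over the column list; ex_tab[c][i] lookup written inline as in Source B.
def pvCells (d : PySem.Dict String (List (Int × String))) (cs : List String) (i : Int) : List String :=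
  match cs with
  | [] => []
  | c :: rest => ((PySem.Dict.ofList ((d.get? c).getD [])).get? i).getD "" :: pvCells d rest i

-- rows(i): Python recurses on i until i > n; ported with the (same) decreasing fuel n - i + 1.
def pvRows (d : PySem.Dict String (List (Int × String))) (cols : List String)
    (fuel : Nat) (i : Int) : List (List String) :=
  match fuel with
  | 0 => []
  | k + 1 => ([PySem.Int.toStr i] ++ pvCells d cols i) :: pvRows d cols k (i + 1)

def ex_tabelle_zu_CSV_alt (ex_tab : List (String × List (Int × String))) : List (List String) :=
  let d := PySem.Dict.ofList ex_tab
  let cols := d.keys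
  match PySem.List.pyGet? cols 0 with
  | none => []
  | some c0 =>
    let n : Int := (PySem.Dict.ofList ((d.get? c0).getD [])).size
    cols :: pvRows d cols n.toNat 1

-- ===== PRECONDITION & SPEC =====
-- Pre_ excludes exactly the inputs where the Python raises: the empty dict (IndexError on
-- spalten_namen[0]) and tables where some column dict lacks a key i in 1..zeilen_anzahl (KeyError).
def Pre_ex_tabelle_zu_CSV (ex_tab : List (String × List (Int × String))) : Prop :=
  ex_tab ≠ [] ∧
  ∀ c ∈ (PySem.Dict.ofList ex_tab).keys,
    ∀ i ∈ PySem.List.pyRange 1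
        ((PySem.Dict.ofList (((PySem.Dict.ofList ex_tab).get?
            (((PySem.Dict.ofList ex_tab).keys.headD ""))).getD [])).size + 1) 1,
      ((PySem.Dict.ofList (((PySem.Dict.ofList ex_tab).get? c).getD [])).get? i).isSome
instance (ex_tab : List (String × List (Int × String))) : Decidable (Pre_ex_tabelle_zu_CSV ex_tab) := by unfold Pre_ex_tabelle_zu_CSV; infer_instance

def pvWitness_ex_tabelle_zu_CSV : (List (String × List (Int × String))) :=
  [("x", [(1, "a"), (2, "b")]), ("y", [(1, "c"), (2, "d")])]

def Spec_ex_tabelle_zu_CSV (ex_tab : List (String × List (Int × String))) (out : List (List String)) : Prop := out = ex_tabelle_zu_CSV_alt ex_tab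
instance (ex_tab : List (String × List (Int × String))) (out : List (List String)) : Decidable (Spec_ex_tabelle_zu_CSV ex_tab out) := by unfold Spec_ex_tabelle_zu_CSV; infer_instance

-- ===== CLAIM (what is proved, stated in full; the proofs are below) =====
def Claim_equal_ex_tabelle_zu_CSV : Prop := ∀ (ex_tab : List (String × List (Int × String))), Dom_ex_tabelle_zu_CSV ex_tab → Pre_ex_tabelle_zu_CSV ex_tab → Spec_ex_tabelle_zu_CSV ex_tab (ex_tabelle_zu_CSV ex_tab)

-- ===== LEMMAS AND PROOFS =====

-- A's append-accumulating loop is the map over the range.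
theorem pv_foldl_append_map {α β : Type} (f : α → β) (l : List α) (a : List β) :
    l.foldl (fun acc i => acc ++ [f i]) a = a ++ l.map f := by
  induction l generalizing a with
  | nil => simp
  | cons x xs ih => simp [List.foldl, ih, List.append_assoc]

-- B's row recursion equals the range map of one row per index.
theorem pv_cells_eq_map (d : PySem.Dict String (List (Int × String))) (cs : List String) (i : Int) :
    pvCells d cs i = cs.map (fun c => pvCell d c i) := by
  induction cs with
  | nil => rfl
  | cons c rest ih => simp [pvCells, pvCell, ih]

theorem pv_rows_eq_map (d : PySem.Dict String (List (Int × String))) (cols : List String)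
    (k : Nat) (i : Int) :
    pvRows d cols k i
      = (List.range k).map (fun (j : Nat) =>
          [PySem.Int.toStr (i + (j : Int))] ++ cols.map (fun c => pvCell d c (i + (j : Int)))) := by
  induction k generalizing i with
  | zero => rfl
  | succ k ih =>
    rw [List.range_succ_eq_map]
    simp only [pvRows, List.map_cons, List.map_map, Function.comp_def, ih (i + 1),
      pv_cells_eq_map, Nat.cast_zero, add_zero, List.cons_append, List.nil_append]
    congr 1
    apply List.map_congr_left
    intro j _
    have : i + 1 + (j : Int) = i + ((j : Int) + 1) := by ring
    simp [Nat.succ_eq_add_one, this]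

theorem ex_tabelle_zu_CSV_eq_alt (ex_tab : List (String × List (Int × String))) :
    ex_tabelle_zu_CSV ex_tab = ex_tabelle_zu_CSV_alt ex_tab := by
  simp only [ex_tabelle_zu_CSV, ex_tabelle_zu_CSV_alt]
  cases h : PySem.List.pyGet? (PySem.Dict.ofList ex_tab).keys 0 with
  | none => simp only [h]
  | some c0 =>
    simp only [h]
    rw [pv_foldl_append_map, pv_rows_eq_map, PySem.List.pyRange_one]
    have : ((PySem.Dict.ofList ((PySem.Dict.get? (PySem.Dict.ofList ex_tab) c0).getD [])).size
        + 1 - 1 : Int) = (PySem.Dict.ofList ((PySem.Dict.get? (PySem.Dict.ofList ex_tab) c0).getD [])).size := by ring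
    rw [this]
    simp [List.map_map, Function.comp_def, add_comm]

-- ===== VERDICT (by name: the statement is the Claim_ definition above) =====
theorem ex_tabelle_zu_CSV_spec : Claim_equal_ex_tabelle_zu_CSV := by
  intro ex_tab _ _
  unfold Spec_ex_tabelle_zu_CSV
  exact ex_tabelle_zu_CSV_eq_alt ex_tab
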